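-- pv_equiv track=rewrite | github.com/njain-icon/classifier | classifier/entity_classifier/core/utils.py | has_consecutive_decreasing_numbers
-- ===== SOURCE A (Python) =====
-- def has_consecutive_decreasing_numbers(s: str, min_consecutive: int = 5) -> bool:
--     """
--     Check if the input string contains a sequence of at least `min_consecutive` digits
--     where each digit is exactly one less than the previous (e.g., '98765').
--
--     Args:
--         s (str): The string to check.
--         min_consecutive (int): The minimum length of consecutive decreasing digits. Default is 5.
--
--     Returns:
--         bool: True if such a sequence exists, False otherwise.
--     """
--     digits = [int(c) for c in s if c.isdigit()]
--     if len(digits) < min_consecutive: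
--         return False
--     if len(digits) != len(s):
--         return False
--
--     count = 1
--     for i in range(1, len(digits)):
--         if digits[i] == digits[i - 1] - 1:
--             count += 1
--             if count >= min_consecutive:
--                 return True
--         else:
--             count = 1
--     return False
-- ===== SOURCE B (Python) =====
-- _DESC = "9876543210"
--
--
-- def has_consecutive_decreasing_numbers(s: str, min_consecutive: int = 5) -> bool:
--     """Pattern search instead of a run-length scan: a run of consecutive
--     decreasing digits of length k is exactly a length-k substring of
--     '9876543210', so after the guards the answer is membership of one of
--     the (at most 9) constant windows of that pattern in s."""
--     if not s.isdigit() or len(s) < min_consecutive: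
--         return False
--     k = max(min_consecutive, 2)  # even for min_consecutive <= 1, one decreasing step is required
--     if k > 10:
--         return False  # no decreasing digit run can be longer than 10
--     return any(_DESC[i:i + k] in s for i in range(11 - k))
-- ===== Notes on version B (the rewrite author's own statement) =====
-- stated objective: faster
-- what changed: B replaces A's digit-list plus stateful run-counting loop by a constant-pattern search: after guarding that s is all digits and long enough, it checks whether any length-max(min_consecutive,2) window of the fixed descending-digits pattern occurs as a substring of s (no run of consecutive decreasing digits can exceed 10).
import Mathlib
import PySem

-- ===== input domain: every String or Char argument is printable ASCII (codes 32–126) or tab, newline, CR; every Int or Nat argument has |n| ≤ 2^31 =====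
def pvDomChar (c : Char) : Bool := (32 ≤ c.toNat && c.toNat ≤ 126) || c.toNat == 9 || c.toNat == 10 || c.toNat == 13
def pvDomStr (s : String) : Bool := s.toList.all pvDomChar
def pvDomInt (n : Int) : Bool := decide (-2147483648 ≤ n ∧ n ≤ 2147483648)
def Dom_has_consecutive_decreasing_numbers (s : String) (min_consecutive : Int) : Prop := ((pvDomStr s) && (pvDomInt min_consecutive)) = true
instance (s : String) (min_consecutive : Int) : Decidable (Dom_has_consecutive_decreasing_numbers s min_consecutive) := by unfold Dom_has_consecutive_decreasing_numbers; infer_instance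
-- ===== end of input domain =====

-- B replaces A's digit-list + stateful run-counting loop by a constant-pattern
-- search: a decreasing-by-1 digit run of length k is exactly a length-k substring
-- of '9876543210' (no such run can exceed 10 digits), so after the all-digits and
-- length guards the answer is a membership test of at most 9 constant windows.

-- ===== PORT A =====
-- int(c) for an ASCII digit character (exact there; A only applies it to chars passing
-- isdigit, which on the ASCII domain are exactly '0'..'9')
def pvToInt (c : Char) : Int := (c.toNat : Int) - 48

-- the 'for i in range(1, len(digits))' loop of A, with its early return and count state
def pvLoopA (min_consecutive : Int) (prev : Int) (rest : List Int) (count : Int) : Bool :=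
  match rest with
  | [] => false
  | d :: tl =>
    if d = prev - 1 then
      if count + 1 ≥ min_consecutive then true
      else pvLoopA min_consecutive d tl (count + 1)
    else pvLoopA min_consecutive d tl 1

def has_consecutive_decreasing_numbers (s : String) (min_consecutive : Int) : Bool :=
  let digits := s.toList.filterMap (fun c => if PySem.Chars.isdigit c then some (pvToInt c) else none)
  if (digits.length : Int) < min_consecutive then false
  else if (digits.length : Int) ≠ (s.toList.length : Int) then false
  else
    match digits with
    | [] => false
    | d :: tl => pvLoopA min_consecutive d tl 1

-- ===== PORT B =====
def pvDesc : String := "9876543210"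

def has_consecutive_decreasing_numbers_alt (s : String) (min_consecutive : Int) : Bool :=
  if ¬ (PySem.Str.strIsdigit s = true) ∨ (s.toList.length : Int) < min_consecutive then false
  else if max min_consecutive 2 > 10 then false
  else (PySem.List.pyRange 0 (11 - max min_consecutive 2) 1).any (fun i =>
    PySem.Str.isIn (PySem.Str.slice pvDesc (some i) (some (i + max min_consecutive 2))) s)

-- ===== PRECONDITION & SPEC =====
def Spec_has_consecutive_decreasing_numbers (s : String) (min_consecutive : Int) (out : Bool) : Prop := out = has_consecutive_decreasing_numbers_alt s min_consecutive
instance (s : String) (min_consecutive : Int) (out : Bool) : Decidable (Spec_has_consecutive_decreasing_numbers s min_consecutive out) := by unfold Spec_has_consecutive_decreasing_numbers; infer_instance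

-- ===== CLAIM (what is proved, stated in full; the proofs are below) =====
def Claim_equal_has_consecutive_decreasing_numbers : Prop := ∀ (s : String) (min_consecutive : Int), Dom_has_consecutive_decreasing_numbers s min_consecutive → Spec_has_consecutive_decreasing_numbers s min_consecutive (has_consecutive_decreasing_numbers s min_consecutive)

-- ===== LEMMAS AND PROOFS =====

-- a run of adjacent decreasing-by-1 characters
def pvChain : List Char → Bool
  | [] => true
  | [_] => true
  | a :: b :: t => (a.toNat == b.toNat + 1) && pvChain (b :: t)

-- "s contains a decreasing run of at least max(mc,2) characters"
def pvE (mc : Int) (l : List Char) : Prop :=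
  ∃ w, pvChain w = true ∧ w <:+: l ∧ 2 ≤ w.length ∧ mc ≤ (w.length : Int)

-- window i..i+m of the descending pattern
def pvWin (i m : Nat) : List Char := (pvDesc.toList.drop i).take m

theorem pvChain_cons₂ (a b : Char) (t : List Char) :
    pvChain (a :: b :: t) = ((a.toNat == b.toNat + 1) && pvChain (b :: t)) := rfl

theorem pvChain_tail (a : Char) (t : List Char) (h : pvChain (a :: t) = true) :
    pvChain t = true := by
  cases t with
  | nil => rfl
  | cons b t' => rw [pvChain_cons₂, Bool.and_eq_true] at h; exact h.2

theorem pvChain_take (w : List Char) : ∀ (n : Nat), pvChain w = true → pvChain (w.take n) = true := by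
  induction w with
  | nil => intro n _; simp [pvChain]
  | cons a t ih =>
    intro n h
    cases n with
    | zero => simp [pvChain]
    | succ m =>
      cases t with
      | nil => cases m <;> simp [pvChain]
      | cons b t' =>
        cases m with
        | zero => simp [pvChain]
        | succ m' =>
          rw [List.take_succ_cons, List.take_succ_cons, pvChain_cons₂, Bool.and_eq_true]
          rw [pvChain_cons₂, Bool.and_eq_true] at h
          exact ⟨h.1, by simpa [List.take_succ_cons] using ih (m' + 1) h.2⟩

theorem pvChain_drop (w : List Char) : ∀ (n : Nat), pvChain w = true → pvChain (w.drop n) = true := by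
  induction w with
  | nil => intro n _; simp [pvChain]
  | cons a t ih =>
    intro n h
    cases n with
    | zero => simpa using h
    | succ m => rw [List.drop_succ_cons]; exact ih m (pvChain_tail a t h)

theorem pvChain_getElem (t : List Char) : ∀ (a : Char), pvChain (a :: t) = true →
    ∀ (j : Nat) (hj : j < t.length + 1),
      ((a :: t)[j]'(by simpa using hj)).toNat + j = a.toNat := by
  induction t with
  | nil =>
    intro a _ j hj
    simp only [List.length_nil] at hj
    interval_cases j
    simp
  | cons b t' ih =>
    intro a h j hj
    cases j with
    | zero => simp
    | succ m =>
      rw [pvChain_cons₂, Bool.and_eq_true, beq_iff_eq] at h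
      have hm := ih b h.2 m (by simp only [List.length_cons] at hj; omega)
      simp only [List.getElem_cons_succ] at hm ⊢
      omega

theorem pvDesc_len : pvDesc.toList.length = 10 := by decide

theorem pvDesc_slen : pvDesc.length = 10 := by decide

theorem pvDesc_get : ∀ (j : Fin 10),
    (pvDesc.toList[(j : Nat)]'(by rw [pvDesc_len]; exact j.2)).toNat = 57 - (j : Nat) := by
  decide

theorem pvDesc_get' (i : Nat) (hi : i < 10) :
    (pvDesc.toList[i]'(by rw [pvDesc_len]; exact hi)).toNat = 57 - i := pvDesc_get ⟨i, hi⟩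

-- every window of the pattern is a chain of the right length
theorem pvWin_spec (i m : Nat) (h : i + m ≤ 10) :
    pvChain (pvWin i m) = true ∧ (pvWin i m).length = m := by
  constructor
  · exact pvChain_take _ m (pvChain_drop _ i (by decide))
  · simp [pvWin, pvDesc_slen]; omega

theorem pvChar_eq_of_toNat {c d : Char} (h : c.toNat = d.toNat) : c = d :=
  Char.ext (UInt32.toNat_inj.mp h)

theorem pvIsdigit_toNat {c : Char} (h : PySem.Chars.isdigit c = true) :
    48 ≤ c.toNat ∧ c.toNat ≤ 57 := by
  simp only [PySem.Chars.isdigit, Bool.and_eq_true, decide_eq_true_eq, Char.le_def,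
    UInt32.le_iff_toNat_le] at h
  exact h

-- a chain of digit characters is exactly a window of the pattern
theorem pvChain_digits_win (a : Char) (t : List Char)
    (h : pvChain (a :: t) = true)
    (hd : ∀ c ∈ a :: t, PySem.Chars.isdigit c = true) :
    48 + t.length ≤ a.toNat ∧ a.toNat ≤ 57 ∧
      (a :: t) = pvWin (57 - a.toNat) (t.length + 1) := by
  have hdig : ∀ c ∈ a :: t, 48 ≤ c.toNat ∧ c.toNat ≤ 57 := fun c hc => pvIsdigit_toNat (hd c hc)
  have ha57 : a.toNat ≤ 57 := (hdig a List.mem_cons_self).2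
  have hlast := pvChain_getElem t a h t.length (Nat.lt_succ_self _)
  have hlm : (a :: t)[t.length]'(by simp) ∈ a :: t := List.getElem_mem _
  have hlow : 48 + t.length ≤ a.toNat := by
    have := (hdig _ hlm).1
    omega
  refine ⟨hlow, ha57, ?_⟩
  have h10 : (57 - a.toNat) + (t.length + 1) ≤ 10 := by omega
  have hwl := (pvWin_spec (57 - a.toNat) (t.length + 1) h10).2
  apply List.ext_getElem (by simp [hwl])
  intro j h1 h2
  have hj : j < t.length + 1 := by simpa using h1
  have hLHS := pvChain_getElem t a h j hj
  have hidx : (57 - a.toNat) + j < 10 := by omega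
  have hRHS : (pvWin (57 - a.toNat) (t.length + 1))[j]'h2 =
      pvDesc.toList[(57 - a.toNat) + j]'(by rw [pvDesc_len]; exact hidx) := by
    simp [pvWin, List.getElem_take, List.getElem_drop]
  apply pvChar_eq_of_toNat
  rw [hRHS, pvDesc_get' ((57 - a.toNat) + j) hidx]
  omega

-- ===== A-side: the loop means pvE =====

theorem pvLoopA_inv (mc : Int) (hmc : 2 ≤ mc) : ∀ (tl : List Char) (p : Char) (count : Int),
    1 ≤ count → count < mc →
    (pvLoopA mc (pvToInt p) (tl.map pvToInt) count = true ↔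
      (∃ w, pvChain (p :: w) = true ∧ w <+: tl ∧ mc ≤ count + (w.length : Int)) ∨
      (∃ w, pvChain w = true ∧ w <:+: tl ∧ 2 ≤ w.length ∧ mc ≤ (w.length : Int))) := by
  intro tl
  induction tl with
  | nil =>
    intro p count h1 h2
    simp only [List.map_nil, pvLoopA]
    constructor
    · intro hf; cases hf
    · rintro (⟨w, hc, hp, hl⟩ | ⟨w, hc, hi, h2', hl⟩)
      · obtain rfl := List.prefix_nil.mp hp
        simp at hl; omega
      · obtain rfl := List.infix_nil.mp hi
        simp at h2'
  | cons c tl ih =>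
    intro p count h1 h2
    simp only [List.map_cons, pvLoopA]
    by_cases hs : p.toNat = c.toNat + 1
    · rw [if_pos (show pvToInt c = pvToInt p - 1 by unfold pvToInt; omega)]
      by_cases hge : count + 1 ≥ mc
      · rw [if_pos hge]
        constructor
        · intro _
          exact Or.inl ⟨[c], by simp [pvChain, hs],
            List.cons_prefix_cons.mpr ⟨rfl, List.nil_prefix⟩, by simp; omega⟩
        · intro _; rfl
      · rw [if_neg hge, ih c (count + 1) (by omega) (by omega)]
        constructor
        · rintro (⟨w, hc2, hp2, hl2⟩ | ⟨w, hc2, hi2, hw2, hl2⟩)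
          · refine Or.inl ⟨c :: w, ?_, List.cons_prefix_cons.mpr ⟨rfl, hp2⟩, by
              simp only [List.length_cons] at *; push_cast at hl2 ⊢; omega⟩
            rw [pvChain_cons₂, Bool.and_eq_true, beq_iff_eq]
            exact ⟨hs, hc2⟩
          · exact Or.inr ⟨w, hc2, List.infix_cons hi2, hw2, hl2⟩
        · rintro (⟨w, hc2, hp2, hl2⟩ | ⟨w, hc2, hi2, hw2, hl2⟩)
          · cases w with
            | nil => simp at hl2; omega
            | cons c' w' =>
              obtain ⟨rfl, hp'⟩ := List.cons_prefix_cons.mp hp2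
              refine Or.inl ⟨w', pvChain_tail p _ hc2, hp', by
                simp only [List.length_cons] at hl2; push_cast at hl2 ⊢; omega⟩
          · rcases List.infix_cons_iff.mp hi2 with hpre | hsuf
            · cases w with
              | nil => simp at hw2
              | cons c' w' =>
                obtain ⟨rfl, hp'⟩ := List.cons_prefix_cons.mp hpre
                refine Or.inl ⟨w', hc2, hp', by
                  simp only [List.length_cons] at hl2; push_cast at hl2 ⊢; omega⟩
            · exact Or.inr ⟨w, hc2, hsuf, hw2, hl2⟩
    · rw [if_neg (show ¬ (pvToInt c = pvToInt p - 1) by unfold pvToInt; omega),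
        ih c 1 (by omega) (by omega)]
      constructor
      · rintro (⟨w, hc2, hp2, hl2⟩ | ⟨w, hc2, hi2, hw2, hl2⟩)
        · refine Or.inr ⟨c :: w, hc2, (List.cons_prefix_cons.mpr ⟨rfl, hp2⟩).isInfix, by
            simp only [List.length_cons]; omega, by
            simp only [List.length_cons]; push_cast at hl2 ⊢; omega⟩
        · exact Or.inr ⟨w, hc2, List.infix_cons hi2, hw2, hl2⟩
      · rintro (⟨w, hc2, hp2, hl2⟩ | ⟨w, hc2, hi2, hw2, hl2⟩)
        · cases w with
          | nil => simp at hl2; omega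
          | cons c' w' =>
            obtain ⟨rfl, hp'⟩ := List.cons_prefix_cons.mp hp2
            rw [pvChain_cons₂, Bool.and_eq_true, beq_iff_eq] at hc2
            exact absurd hc2.1 hs
        · rcases List.infix_cons_iff.mp hi2 with hpre | hsuf
          · cases w with
            | nil => simp at hw2
            | cons c' w' =>
              obtain ⟨rfl, hp'⟩ := List.cons_prefix_cons.mp hpre
              refine Or.inl ⟨w', hc2, hp', by
                simp only [List.length_cons] at hl2; push_cast at hl2 ⊢; omega⟩
          · exact Or.inr ⟨w, hc2, hsuf, hw2, hl2⟩

theorem pvLoopA_small (mc : Int) (hmc : mc ≤ 1) : ∀ (tl : List Char) (p : Char) (count : Int),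
    1 ≤ count →
    (pvLoopA mc (pvToInt p) (tl.map pvToInt) count = true ↔
      ∃ w, pvChain w = true ∧ w <:+: (p :: tl) ∧ w.length = 2) := by
  intro tl
  induction tl with
  | nil =>
    intro p count h1
    simp only [List.map_nil, pvLoopA]
    constructor
    · intro hf; cases hf
    · rintro ⟨w, hc, hi, hl⟩
      have := hi.length_le
      simp only [List.length_cons, List.length_nil] at this
      omega
  | cons c tl ih =>
    intro p count h1
    simp only [List.map_cons, pvLoopA]
    by_cases hs : p.toNat = c.toNat + 1
    · rw [if_pos (show pvToInt c = pvToInt p - 1 by unfold pvToInt; omega),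
        if_pos (show count + 1 ≥ mc by omega)]
      constructor
      · intro _
        exact ⟨[p, c], by simp [pvChain, hs],
          (List.cons_prefix_cons.mpr ⟨rfl, List.cons_prefix_cons.mpr
            ⟨rfl, List.nil_prefix⟩⟩).isInfix, rfl⟩
      · intro _; rfl
    · rw [if_neg (show ¬ (pvToInt c = pvToInt p - 1) by unfold pvToInt; omega), ih c 1 le_rfl]
      constructor
      · rintro ⟨w, hc2, hi2, hl2⟩
        exact ⟨w, hc2, List.infix_cons hi2, hl2⟩
      · rintro ⟨w, hc2, hi2, hl2⟩
        rcases List.infix_cons_iff.mp hi2 with hpre | hsuf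
        · cases w with
          | nil => simp at hl2
          | cons a w' =>
            obtain ⟨rfl, hp'⟩ := List.cons_prefix_cons.mp hpre
            cases w' with
            | nil => simp at hl2
            | cons b w'' =>
              obtain ⟨rfl, _⟩ := List.cons_prefix_cons.mp hp'
              cases w'' with
              | cons x y => simp at hl2
              | nil =>
                rw [pvChain_cons₂, Bool.and_eq_true, beq_iff_eq] at hc2
                exact absurd hc2.1 hs
        · exact ⟨w, hc2, hsuf, hl2⟩

theorem pvLoopA_iff_E (mc : Int) (p : Char) (tl : List Char) :
    pvLoopA mc (pvToInt p) (tl.map pvToInt) 1 = true ↔ pvE mc (p :: tl) := by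
  by_cases hmc : 2 ≤ mc
  · rw [pvLoopA_inv mc hmc tl p 1 le_rfl (by omega)]
    unfold pvE
    constructor
    · rintro (⟨w, hc, hp, hl⟩ | ⟨w, hc, hi, hw, hl⟩)
      · exact ⟨p :: w, hc, (List.cons_prefix_cons.mpr ⟨rfl, hp⟩).isInfix, by
          simp only [List.length_cons]; omega, by
          simp only [List.length_cons]; push_cast at hl ⊢; omega⟩
      · exact ⟨w, hc, List.infix_cons hi, hw, hl⟩
    · rintro ⟨w, hc, hi, hw, hl⟩
      rcases List.infix_cons_iff.mp hi with hpre | hsuf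
      · cases w with
        | nil => simp at hw
        | cons a w' =>
          obtain ⟨rfl, hp'⟩ := List.cons_prefix_cons.mp hpre
          exact Or.inl ⟨w', hc, hp', by
            simp only [List.length_cons] at hl; push_cast at hl ⊢; omega⟩
      · exact Or.inr ⟨w, hc, hsuf, hw, hl⟩
  · rw [pvLoopA_small mc (by omega) tl p 1 le_rfl]
    unfold pvE
    constructor
    · rintro ⟨w, hc, hi, hl⟩
      exact ⟨w, hc, hi, by omega, by rw [hl]; omega⟩
    · rintro ⟨w, hc, hi, hw, hl⟩
      refine ⟨w.take 2, pvChain_take w 2 hc, (List.take_prefix 2 w).isInfix.trans hi, by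
        simp only [List.length_take]; omega⟩

-- ===== B-side: the window search means pvE =====

theorem pvE_iff_win (mc : Int) (l : List Char) (hd : ∀ c ∈ l, PySem.Chars.isdigit c = true) :
    pvE mc l ↔ (max mc 2 ≤ 10 ∧
      ∃ i : Nat, (i : Int) < 11 - max mc 2 ∧ pvWin i (max mc 2).toNat <:+: l) := by
  have hk2 : (2 : Int) ≤ max mc 2 := le_max_right _ _
  constructor
  · rintro ⟨w, hc, hi, hw2, hwm⟩
    have hkle : (max mc 2).toNat ≤ w.length := by omega
    have hcu : pvChain (w.take (max mc 2).toNat) = true := pvChain_take _ _ hc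
    have hui : w.take (max mc 2).toNat <:+: l := (List.take_prefix _ _).isInfix.trans hi
    have hul : (w.take (max mc 2).toNat).length = (max mc 2).toNat := by
      simp only [List.length_take]; omega
    have hdu : ∀ c ∈ w.take (max mc 2).toNat, PySem.Chars.isdigit c = true :=
      fun c hc' => hd c (hui.subset hc')
    rcases hu : w.take (max mc 2).toNat with _ | ⟨a, t⟩
    · rw [hu] at hul; simp at hul; omega
    · rw [hu] at hcu hui hul hdu
      obtain ⟨hlow, hhigh, heq⟩ := pvChain_digits_win a t hcu hdu
      have hlen : t.length + 1 = (max mc 2).toNat := by simpa using hul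
      refine ⟨by omega, 57 - a.toNat, by omega, ?_⟩
      rw [← hlen, ← heq]
      exact hui
  · rintro ⟨hky, i, hilt, hwin⟩
    have h10 : i + (max mc 2).toNat ≤ 10 := by omega
    obtain ⟨hwc, hwl⟩ := pvWin_spec i (max mc 2).toNat h10
    exact ⟨pvWin i (max mc 2).toNat, hwc, hwin, by omega, by rw [hwl]; omega⟩

-- ===== guards =====

theorem filterMap_digits_all {l : List Char}
    (h : l.all PySem.Chars.isdigit = true) :
    l.filterMap (fun c => if PySem.Chars.isdigit c then some (pvToInt c) else none)
      = l.map pvToInt := by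
  induction l with
  | nil => rfl
  | cons c tl ih =>
    rw [List.all_cons, Bool.and_eq_true] at h
    simp [h.1, ih h.2]

theorem filterMap_digits_lt {l : List Char}
    (h : ¬ l.all PySem.Chars.isdigit = true) :
    (l.filterMap (fun c => if PySem.Chars.isdigit c then some (pvToInt c) else none)).length
      < l.length := by
  induction l with
  | nil => simp at h
  | cons c tl ih =>
    by_cases hc : PySem.Chars.isdigit c = true
    · have htl : ¬ tl.all PySem.Chars.isdigit = true := by
        intro ht
        exact h (by rw [List.all_cons, Bool.and_eq_true]; exact ⟨hc, ht⟩)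
      simpa [List.filterMap_cons, hc] using Nat.succ_lt_succ (ih htl)
    · have hle := List.length_filterMap_le
        (fun c => if PySem.Chars.isdigit c then some (pvToInt c) else none) tl
      rw [Bool.not_eq_true] at hc
      simp only [List.filterMap_cons, hc, Bool.false_eq_true, if_false, List.length_cons]
      omega

-- ===== VERDICT (by name: the statement is the Claim_ definition above) =====
theorem has_consecutive_decreasing_numbers_spec : Claim_equal_has_consecutive_decreasing_numbers := by
  intro s mc _
  unfold Spec_has_consecutive_decreasing_numbers
  unfold has_consecutive_decreasing_numbers has_consecutive_decreasing_numbers_alt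
  unfold PySem.Str.strIsdigit PySem.Chars.strIsdigit PySem.Str.isIn
  by_cases hall : s.toList.all PySem.Chars.isdigit = true
  · rw [filterMap_digits_all hall]
    simp only [List.length_map]
    rcases hl : s.toList with _ | ⟨p, tl⟩
    · simp [ite_self]
    · rw [hl] at hall
      have hdg : ∀ c ∈ p :: tl, PySem.Chars.isdigit c = true := List.all_eq_true.mp hall
      have hne : (!(p :: tl).isEmpty && (p :: tl).all PySem.Chars.isdigit) = true := by
        simp [hall]
      by_cases hlen : (((p :: tl).length : Nat) : Int) < mc
      · rw [if_pos hlen, if_pos (Or.inr hlen)]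
      · rw [if_neg hlen,
          if_neg (show ¬ ((((p :: tl).length : Nat) : Int) ≠ (((p :: tl).length : Nat) : Int)) by omega),
          if_neg (show ¬ (¬ (!(p :: tl).isEmpty && (p :: tl).all PySem.Chars.isdigit) = true ∨
            (((p :: tl).length : Nat) : Int) < mc) by
              rintro (h | h)
              · exact h hne
              · exact hlen h)]
        simp only [List.map_cons]
        show pvLoopA mc (pvToInt p) (tl.map pvToInt) 1 = _
        by_cases hk : max mc 2 > 10
        · rw [if_pos hk, Bool.eq_iff_iff]
          constructor
          · intro hA
            exact absurd ((pvE_iff_win mc (p :: tl) hdg).mp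
              ((pvLoopA_iff_E mc p tl).mp hA)).1 (by omega)
          · intro h; simp at h
        · rw [if_neg hk, Bool.eq_iff_iff, pvLoopA_iff_E mc p tl,
            pvE_iff_win mc (p :: tl) hdg, List.any_eq_true]
          constructor
          · rintro ⟨hk10, i, hilt, hwin⟩
            refine ⟨(i : Int), ?_, ?_⟩
            · rw [PySem.List.mem_pyRange_one]
              exact ⟨by positivity, hilt⟩
            · have h2 : (2 : Int) ≤ max mc 2 := le_max_right _ _
              rw [PySem.Str.toList_slice, PySem.Chars.slice_eq_listSlice,
                PySem.List.slice_toNat pvDesc.toList (Int.natCast_nonneg i) (by omega),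
                PySem.Chars.isIn_iff_infix]
              have hcast : ((i : Int) + max mc 2).toNat - ((i : Int)).toNat = (max mc 2).toNat := by
                omega
              rw [hcast, Int.toNat_natCast]
              exact hwin
          · rintro ⟨i, hmem, hin⟩
            rw [PySem.List.mem_pyRange_one] at hmem
            obtain ⟨hi0, hilt⟩ := hmem
            obtain ⟨i', rfl⟩ := Int.eq_ofNat_of_zero_le hi0
            have h2 : (2 : Int) ≤ max mc 2 := le_max_right _ _
            rw [PySem.Str.toList_slice, PySem.Chars.slice_eq_listSlice,
              PySem.List.slice_toNat pvDesc.toList (Int.natCast_nonneg i') (by omega),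
              PySem.Chars.isIn_iff_infix] at hin
            have hcast : ((i' : Int) + max mc 2).toNat - ((i' : Int)).toNat = (max mc 2).toNat := by
              omega
            rw [hcast, Int.toNat_natCast] at hin
            exact ⟨by omega, i', hilt, hin⟩
  · have hlt := filterMap_digits_lt hall
    have hB : ¬ (!s.toList.isEmpty && s.toList.all PySem.Chars.isdigit) = true := by
      simp only [Bool.and_eq_true]
      rintro ⟨-, h⟩
      exact hall h
    rw [if_pos (Or.inl hB)]
    by_cases hm : ((s.toList.filterMap
        (fun c => if PySem.Chars.isdigit c then some (pvToInt c) else none)).length : Int) < mc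
    · rw [if_pos hm]
    · rw [if_neg hm, if_pos (by exact_mod_cast Nat.ne_of_lt hlt)]
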